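-- pv_equiv track=rewrite | github.com/Saksham-Chhabra/grain-route | ml/examples/generate_ml_lecture_docx.py | summarize_feature_columns
-- ===== SOURCE A (Python) =====
-- from typing import Any, Dict, List, Optional, Tuple
--
-- def summarize_feature_columns(feature_columns: List[str]) -> Dict[str, List[str]]:
--     groups: Dict[str, List[str]] = {
--         "festival_*": [],
--         "income": [],
--         "request_*": [],
--         "shipment_*": [],
--         "batch_*": [],
--         "ratios_and_deltas": [],
--         "other": [],
--     }
--
--     for col in feature_columns:
--         if col.startswith("festival_"):
--             groups["festival_*"] .append(col)
--         elif col.startswith("per_capita_income"):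
--             groups["income"].append(col)
--         elif col.startswith("request_status_") or col in {"requested_kg", "unique_food_types", "request_count"}:
--             groups["request_*"].append(col)
--         elif col.startswith("incoming_") or col.startswith("outgoing_") or col == "avg_travel_time_minutes":
--             groups["shipment_*"].append(col)
--         elif col.startswith("produced_") or col.startswith("avg_batch_") or col == "avg_shelf_life_hours":
--             groups["batch_*"].append(col)
--         elif col in {
--             "supply_demand_gap_kg",
--             "net_flow_kg",
--             "production_vs_demand_ratio",
--             "request_to_supply_ratio",
--         }:
--             groups["ratios_and_deltas"].append(col)
--         else:
--             groups["other"].append(col)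
--
--     # remove empties
--     return {k: v for k, v in groups.items() if v}
-- ===== SOURCE B (Python) =====
-- def summarize_feature_columns(feature_columns):
--     def classify(col):
--         if col.startswith("festival_"):
--             return "festival_*"
--         if col.startswith("per_capita_income"):
--             return "income"
--         if col.startswith("request_status_") or col in {"requested_kg", "unique_food_types", "request_count"}:
--             return "request_*"
--         if col.startswith("incoming_") or col.startswith("outgoing_") or col == "avg_travel_time_minutes":
--             return "shipment_*"
--         if col.startswith("produced_") or col.startswith("avg_batch_") or col == "avg_shelf_life_hours":
--             return "batch_*"
--         if col in {"supply_demand_gap_kg", "net_flow_kg", "production_vs_demand_ratio", "request_to_supply_ratio"}: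
--             return "ratios_and_deltas"
--         return "other"
--
--     result = {}
--     for group in ("festival_*", "income", "request_*", "shipment_*", "batch_*", "ratios_and_deltas", "other"):
--         members = [c for c in feature_columns if classify(c) == group]
--         if members:
--             result[group] = members
--     return result
-- ===== Notes on version B (the rewrite author's own statement) =====
-- stated objective: alternative
-- what changed: Instead of one element-major pass appending into a pre-seeded dict of lists and stripping empties afterwards, B uses a classify helper and builds the result group-major: for each of the seven group names in order it filters the matching columns in one comprehension and inserts the group only if non-empty.
import Mathlib
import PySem

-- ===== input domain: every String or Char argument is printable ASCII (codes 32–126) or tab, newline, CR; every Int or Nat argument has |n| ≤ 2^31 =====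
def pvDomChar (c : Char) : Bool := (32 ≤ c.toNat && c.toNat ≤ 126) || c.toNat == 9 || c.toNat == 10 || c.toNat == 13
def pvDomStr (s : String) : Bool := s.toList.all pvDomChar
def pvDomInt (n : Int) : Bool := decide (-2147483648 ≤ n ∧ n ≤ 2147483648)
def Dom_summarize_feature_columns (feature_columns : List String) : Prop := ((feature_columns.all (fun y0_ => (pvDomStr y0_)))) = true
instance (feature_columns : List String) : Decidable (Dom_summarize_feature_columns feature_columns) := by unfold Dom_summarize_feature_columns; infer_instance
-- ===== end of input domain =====

-- B replaces A's single element-major pass over a pre-seeded dict of lists (empties stripped at the end)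
-- by a classify helper and a group-major build: one filter per group name, inserted only if non-empty (objective: alternative).

-- ===== PORT A =====
def pvInitGroups : PySem.Dict String (List String) :=
  PySem.Dict.ofList [("festival_*", []), ("income", []), ("request_*", []),
    ("shipment_*", []), ("batch_*", []), ("ratios_and_deltas", []), ("other", [])]

def pvStepA (groups : PySem.Dict String (List String)) (col : String) : PySem.Dict String (List String) :=
  if PySem.Str.startswith col "festival_" then groups.modify "festival_*" [] (· ++ [col])
  else if PySem.Str.startswith col "per_capita_income" then groups.modify "income" [] (· ++ [col])
  else if PySem.Str.startswith col "request_status_" || (col == "requested_kg" || col == "unique_food_types" || col == "request_count") then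
    groups.modify "request_*" [] (· ++ [col])
  else if PySem.Str.startswith col "incoming_" || PySem.Str.startswith col "outgoing_" || col == "avg_travel_time_minutes" then
    groups.modify "shipment_*" [] (· ++ [col])
  else if PySem.Str.startswith col "produced_" || PySem.Str.startswith col "avg_batch_" || col == "avg_shelf_life_hours" then
    groups.modify "batch_*" [] (· ++ [col])
  else if col == "supply_demand_gap_kg" || col == "net_flow_kg" || col == "production_vs_demand_ratio" || col == "request_to_supply_ratio" then
    groups.modify "ratios_and_deltas" [] (· ++ [col])
  else groups.modify "other" [] (· ++ [col])

def summarize_feature_columns (feature_columns : List String) : List (String × List String) :=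
  ((feature_columns.foldl pvStepA pvInitGroups).items).filter (fun p => !p.2.isEmpty)

-- ===== PORT B =====
def pvClassify (col : String) : String :=
  if PySem.Str.startswith col "festival_" then "festival_*"
  else if PySem.Str.startswith col "per_capita_income" then "income"
  else if PySem.Str.startswith col "request_status_" || (col == "requested_kg" || col == "unique_food_types" || col == "request_count") then "request_*"
  else if PySem.Str.startswith col "incoming_" || PySem.Str.startswith col "outgoing_" || col == "avg_travel_time_minutes" then "shipment_*"
  else if PySem.Str.startswith col "produced_" || PySem.Str.startswith col "avg_batch_" || col == "avg_shelf_life_hours" then "batch_*"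
  else if col == "supply_demand_gap_kg" || col == "net_flow_kg" || col == "production_vs_demand_ratio" || col == "request_to_supply_ratio" then "ratios_and_deltas"
  else "other"

def pvGroupNames : List String :=
  ["festival_*", "income", "request_*", "shipment_*", "batch_*", "ratios_and_deltas", "other"]

def summarize_feature_columns_alt (feature_columns : List String) : List (String × List String) :=
  (pvGroupNames.foldl
    (fun acc g =>
      let members := feature_columns.filter (fun c => pvClassify c == g)
      if members.isEmpty then acc else acc.insert g members)
    PySem.Dict.empty).items

-- ===== PRECONDITION & SPEC =====
def Spec_summarize_feature_columns (feature_columns : List String) (out : List (String × List String)) : Prop := out = summarize_feature_columns_alt feature_columns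
instance (feature_columns : List String) (out : List (String × List String)) : Decidable (Spec_summarize_feature_columns feature_columns out) := by unfold Spec_summarize_feature_columns; infer_instance

-- ===== CLAIM (what is proved, stated in full; the proofs are below) =====
def Claim_equal_summarize_feature_columns : Prop := ∀ (feature_columns : List String), Dom_summarize_feature_columns feature_columns → Spec_summarize_feature_columns feature_columns (summarize_feature_columns feature_columns)

-- ===== LEMMAS AND PROOFS =====

theorem pvStepA_eq (d : PySem.Dict String (List String)) (col : String) :
    pvStepA d col = d.modify (pvClassify col) [] (· ++ [col]) := by
  unfold pvStepA pvClassify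
  split_ifs <;> rfl

theorem pvClassify_mem (c : String) : pvClassify c ∈ pvGroupNames := by
  unfold pvClassify pvGroupNames
  split_ifs <;> simp

theorem pvStepA_funext : pvStepA = fun d c => d.modify (pvClassify c) [] (· ++ [c]) :=
  funext fun d => funext fun c => pvStepA_eq d c

theorem pvInit_getD (g : String) : pvInitGroups.getD g [] = [] := by
  have h : pvInitGroups = PySem.Dict.mk [("festival_*", []), ("income", []), ("request_*", []),
      ("shipment_*", []), ("batch_*", []), ("ratios_and_deltas", []), ("other", [])] := by decide
  rw [h, PySem.Dict.getD_eq_get?_getD]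
  simp [PySem.Dict.get?_mk_cons]
  split_ifs <;> rfl

theorem lemA_fold (cols : List String) :
    cols.foldl pvStepA pvInitGroups
      = (cols.map (fun c => (pvClassify c, c))).foldl
          (fun d p => d.modify p.1 [] (· ++ [p.2])) pvInitGroups := by
  rw [List.foldl_map, pvStepA_funext]

theorem lemA_keys (cols : List String) :
    (cols.foldl pvStepA pvInitGroups).keys = pvGroupNames := by
  rw [pvStepA_funext, PySem.Dict.keys_foldl_modify_key]
  have h : pvInitGroups.keys = pvGroupNames := by decide
  rw [h, PySem.Set.update_eq_append_filter]
  have : (PySem.Set.ofList (cols.map pvClassify)).filter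
      (fun y => !(PySem.Set.contains pvGroupNames y)) = [] := by
    apply List.filter_eq_nil_iff.mpr
    intro y hy
    obtain ⟨c, _, rfl⟩ := List.mem_map.mp ((PySem.Set.mem_ofList _ _).mp hy)
    simpa using pvClassify_mem c
  rw [this, List.append_nil]

theorem lemA_getD (cols : List String) (g : String) :
    (cols.foldl pvStepA pvInitGroups).getD g [] = cols.filter (fun c => pvClassify c == g) := by
  rw [lemA_fold, PySem.Dict.getD_foldl_modify_append, pvInit_getD]
  rw [List.filter_map, List.map_map]
  simp [Function.comp_def]

theorem lemA_items (cols : List String) :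
    (cols.foldl pvStepA pvInitGroups).items
      = pvGroupNames.map (fun g => (g, cols.filter (fun c => pvClassify c == g))) := by
  rw [PySem.Dict.items_eq_map_keys (cols.foldl pvStepA pvInitGroups)
        (by rw [lemA_keys]; decide) []]
  rw [lemA_keys]
  exact List.map_congr_left fun g _ => by rw [lemA_getD]

theorem lemB_fold (ps : List (String × List String)) :
    ∀ (acc : PySem.Dict String (List String)),
      (∀ p ∈ ps, acc.contains p.1 = false) → (ps.map Prod.fst).Nodup →
      (ps.foldl (fun a p => if p.2.isEmpty then a else a.insert p.1 p.2) acc).items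
        = acc.items ++ ps.filter (fun p => !p.2.isEmpty) := by
  induction ps with
  | nil => intro acc _ _; simp
  | cons p ps ih =>
    intro acc hc hnd
    simp only [List.foldl_cons]
    by_cases hp : p.2.isEmpty
    · rw [if_pos hp, ih acc (fun q hq => hc q (List.mem_cons_of_mem _ hq))
        (hnd.sublist ((List.sublist_cons_self p ps).map Prod.fst))]
      simp [hp]
    · rw [if_neg hp]
      have hnotc : acc.contains p.1 = false := hc p (List.mem_cons_self ..)
      rw [ih (acc.insert p.1 p.2) ?_ ?_]
      · rw [PySem.Dict.items_insert]
        simp [hnotc, hp]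
      · intro q hq
        rw [PySem.Dict.contains_insert]
        have hne : q.1 ≠ p.1 := by
          simp only [List.map_cons, List.nodup_cons] at hnd
          exact fun h => hnd.1 (h ▸ List.mem_map_of_mem hq)
        simp [hne, hc q (List.mem_cons_of_mem _ hq)]
      · exact hnd.sublist ((List.sublist_cons_self p ps).map Prod.fst)

theorem lemB (cols : List String) :
    summarize_feature_columns_alt cols
      = (pvGroupNames.map (fun g => (g, cols.filter (fun c => pvClassify c == g)))).filter
          (fun p => !p.2.isEmpty) := by
  unfold summarize_feature_columns_alt
  have h : pvGroupNames.foldl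
      (fun acc g =>
        let members := cols.filter (fun c => pvClassify c == g)
        if members.isEmpty then acc else acc.insert g members)
      PySem.Dict.empty
      = (pvGroupNames.map (fun g => (g, cols.filter (fun c => pvClassify c == g)))).foldl
          (fun a p => if p.2.isEmpty then a else a.insert p.1 p.2) PySem.Dict.empty := by
    rw [List.foldl_map]
  have hcont : ∀ p ∈ pvGroupNames.map (fun g => (g, cols.filter (fun c => pvClassify c == g))),
      PySem.Dict.empty.contains p.1 = false := fun p _ => PySem.Dict.contains_empty (ν := List String) p.1
  have hnd : ((pvGroupNames.map (fun g => (g, cols.filter (fun c => pvClassify c == g)))).map Prod.fst).Nodup := by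
    rw [List.map_map]
    simp [Function.comp_def]
    decide
  rw [h, lemB_fold _ PySem.Dict.empty hcont hnd]
  simp [PySem.Dict.empty]

-- ===== VERDICT (by name: the statement is the Claim_ definition above) =====
theorem summarize_feature_columns_spec : Claim_equal_summarize_feature_columns := by
  intro cols _
  unfold Spec_summarize_feature_columns
  rw [lemB]
  unfold summarize_feature_columns
  rw [lemA_items]
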